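-- pv_equiv track=rewrite | github.com/Bimi1804/answer_grader | python_files/classes.py | __precedence_check
-- ===== SOURCE A (Python) =====
-- def __precedence_check(act_a,act_b,processed_answer):
--     """
--     Checks if the answer fulfills Precedence[A,B]
--
--     Parameters
--     ----------
--     act_a : str
--         The actual text (word) of activity A
--     act_b : str
--         The actual text (word) of activity B
--     processed_answer : str[0..*]
--         the list of processed words of the answer
--
--     Returns
--     -------
--     True -> If the answer fulfills the constraint
--     False -> If the answer does not fulfill the constraint
--     """
--     checking = processed_answer # store the answer
--     if act_b not in checking:
--         # if B not in the answer:
--         return True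
--     while act_b in checking:
--         # as long as B is in the answer:
--         act_b_index = checking.index(act_b) # find index of B
--         if act_a not in checking[:act_b_index]:
--             # If A is not before B:
--             return False
--         # Continue with the part of the answer after the first B
--         checking = checking[act_b_index+1:]
--     # If the answer does not violate the constraint:
--     return True
-- ===== SOURCE B (Python) =====
-- def __precedence_check(act_a, act_b, processed_answer):
--     """Single forward pass: each act_b must be preceded by an act_a seen since the previous act_b."""
--     seen_a = False
--     for word in processed_answer:
--         if word == act_b:
--             if not seen_a:
--                 return False
--             seen_a = False
--         elif word == act_a:
--             seen_a = True
--     return True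
-- ===== Notes on version B (the rewrite author's own statement) =====
-- stated objective: simpler
-- what changed: Replaced the while-loop that repeatedly calls list.index and re-slices the answer with a single forward pass maintaining a 'seen act_a since the last act_b' boolean flag.
import Mathlib
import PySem

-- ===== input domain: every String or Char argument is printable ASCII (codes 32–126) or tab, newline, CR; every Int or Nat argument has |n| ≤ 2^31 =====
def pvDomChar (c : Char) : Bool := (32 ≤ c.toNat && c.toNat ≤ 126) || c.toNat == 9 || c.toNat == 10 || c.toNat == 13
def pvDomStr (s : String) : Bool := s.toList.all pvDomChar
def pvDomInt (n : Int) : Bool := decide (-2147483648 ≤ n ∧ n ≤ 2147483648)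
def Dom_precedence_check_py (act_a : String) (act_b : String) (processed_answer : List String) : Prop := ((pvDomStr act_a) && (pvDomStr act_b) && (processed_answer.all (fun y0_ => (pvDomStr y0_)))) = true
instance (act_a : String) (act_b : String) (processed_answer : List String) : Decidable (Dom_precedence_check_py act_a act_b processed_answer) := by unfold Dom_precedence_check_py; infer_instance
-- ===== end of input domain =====

-- B replaces A's index-and-reslice while-loop with a single forward pass keeping a
-- 'seen act_a since the last act_b' flag (objective: simpler).

-- ===== PORT A =====
-- the 'while act_b in checking' loop: 'act_b in checking' ↔ index? ≠ none
def precAuxA (act_a act_b : String) (checking : List String) : Bool :=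
  match h : PySem.List.index? checking act_b with
  | none => true                                  -- act_b not in checking → True
  | some i =>
      if act_a ∈ PySem.List.slice checking none (some (i : Int))  -- act_a in checking[:i]?
      then precAuxA act_a act_b (PySem.List.slice checking (some ((i : Int) + 1)) none)  -- checking = checking[i+1:]
      else false
termination_by checking.length
decreasing_by
  obtain ⟨hk, _, _⟩ := PySem.List.getElem_of_index?_eq_some h
  have : ((i : Int) + 1) = ((i + 1 : Nat) : Int) := by push_cast; ring
  rw [this, PySem.List.slice_from_natCast, List.length_drop]
  omega

def precedence_check_py (act_a : String) (act_b : String) (processed_answer : List String) : Bool :=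
  precAuxA act_a act_b processed_answer

-- ===== PORT B =====
def precGo (act_a act_b : String) (seen : Bool) (xs : List String) : Bool :=
  match xs with
  | [] => true
  | w :: ws =>
    if w == act_b then (if seen then precGo act_a act_b false ws else false)
    else if w == act_a then precGo act_a act_b true ws
    else precGo act_a act_b seen ws

def precedence_check_py_alt (act_a : String) (act_b : String) (processed_answer : List String) : Bool :=
  precGo act_a act_b false processed_answer

-- ===== PRECONDITION & SPEC =====
def Spec_precedence_check_py (act_a : String) (act_b : String) (processed_answer : List String) (out : Bool) : Prop := out = precedence_check_py_alt act_a act_b processed_answer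
instance (act_a : String) (act_b : String) (processed_answer : List String) (out : Bool) : Decidable (Spec_precedence_check_py act_a act_b processed_answer out) := by unfold Spec_precedence_check_py; infer_instance

-- ===== CLAIM (what is proved, stated in full; the proofs are below) =====
def Claim_equal_precedence_check_py : Prop := ∀ (act_a : String) (act_b : String) (processed_answer : List String), Dom_precedence_check_py act_a act_b processed_answer → Spec_precedence_check_py act_a act_b processed_answer (precedence_check_py act_a act_b processed_answer)

-- ===== LEMMAS AND PROOFS =====
theorem precGo_of_not_mem (a b : String) (seen : Bool) (xs : List String)
    (h : b ∉ xs) : precGo a b seen xs = true := by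
  induction xs generalizing seen with
  | nil => rfl
  | cons w ws ih =>
    simp only [List.mem_cons, not_or] at h
    rw [precGo]
    have hwb : (w == b) = false := by simp [beq_eq_false_iff_ne]; exact fun e => h.1 e.symm
    rw [hwb]
    simp only [Bool.false_eq_true, if_false]
    split <;> exact ih _ h.2

theorem precGo_append (a b : String) (seen : Bool) (pre ys : List String)
    (h : b ∉ pre) : precGo a b seen (pre ++ ys) = precGo a b (seen || decide (a ∈ pre)) ys := by
  induction pre generalizing seen with
  | nil => simp
  | cons w ws ih =>
    simp only [List.mem_cons, not_or] at h
    rw [List.cons_append, precGo]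
    have hwb : (w == b) = false := by simp [beq_eq_false_iff_ne]; exact fun e => h.1 e.symm
    rw [hwb]
    simp only [Bool.false_eq_true, if_false]
    by_cases hwa : w = a
    · subst hwa
      simp only [beq_self_eq_true, if_true, ih _ h.2]
      simp [List.mem_cons]
    · have : (w == a) = false := by simp [beq_eq_false_iff_ne]; exact hwa
      rw [this]
      simp only [Bool.false_eq_true, if_false, ih _ h.2]
      congr 1
      simp [List.mem_cons, Ne.symm hwa]

theorem precAuxA_eq (a b : String) (xs : List String) :
    precAuxA a b xs = precGo a b false xs := by
  induction hn : xs.length using Nat.strong_induction_on generalizing xs with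
  | _ n ih =>
  rw [precAuxA]
  split
  · next h =>
    rw [PySem.List.index?_eq_none_iff] at h
    exact (precGo_of_not_mem a b false xs h).symm
  · next i h =>
    obtain ⟨pre, suf, hxs, hlen, hnot⟩ := (PySem.List.index?_eq_some_iff _ _ _).mp h
    subst hxs
    have hslice1 : PySem.List.slice (pre ++ b :: suf) none (some (i : Int)) = pre := by
      rw [PySem.List.slice_to_natCast, ← hlen, List.take_left]
    have hslice2 : PySem.List.slice (pre ++ b :: suf) (some ((i : Int) + 1)) none = suf := by
      have : ((i : Int) + 1) = ((i + 1 : Nat) : Int) := by push_cast; ring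
      rw [this, PySem.List.slice_from_natCast, ← hlen]
      simp [List.drop_append]
    rw [hslice1, hslice2, precGo_append a b false pre (b :: suf) hnot]
    simp only [Bool.false_or, precGo, beq_self_eq_true, if_true]
    by_cases ha : a ∈ pre
    · simp only [ha, if_true, decide_true, if_true]
      exact ih suf.length (by subst hn; simp; omega) suf rfl
    · simp [ha]

-- ===== VERDICT (by name: the statement is the Claim_ definition above) =====
theorem precedence_check_py_spec : Claim_equal_precedence_check_py := by
  intro a b xs _
  unfold Spec_precedence_check_py precedence_check_py precedence_check_py_alt
  exact precAuxA_eq a b xs
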